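-- pv_equiv track=rewrite | github.com/hanschurer/bloomberg | 1209_Remove All Adjacent Duplicates in String II/candycrush/candy_crush_1D.py | candy_crush
-- ===== SOURCE A (Python) =====
-- def candy_crush(s, k):
--     stack = []
--     for i in range(len(s)):
--         if stack and stack[-1][0]==s[i]:
--             stack[-1][1] += 1
--         else:
--             if stack and stack[-1][1]>=k:
--                 stack.pop()
--             if stack and stack[-1][0]==s[i]:
--                 stack[-1][1] += 1
--             else:
--                 stack.append([s[i], 1])
--     if stack and stack[-1][1]>=k:
--         stack.pop()
--     return ''.join(char*freq for char, freq in stack)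
-- ===== SOURCE B (Python) =====
-- def _runs(s):
--     # maximal-run decomposition of s, built right-to-left: list of (char, length)
--     g = []
--     for ch in reversed(s):
--         if g and g[-1][0] == ch:
--             g[-1] = (ch, g[-1][1] + 1)
--         else:
--             g.append((ch, 1))
--     g.reverse()
--     return g
--
--
-- def _remove_first(g, k):
--     # drop the leftmost run of length >= k; None if there is none
--     for i, (c, n) in enumerate(g):
--         if n >= k:
--             return g[:i] + g[i + 1:]
--     return None
--
--
-- def candy_crush(s, k):
--     # repeatedly delete the leftmost maximal run of length >= k until none is left
--     while True:
--         g = _remove_first(_runs(s), k)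
--         if g is None:
--             return s
--         s = ''.join(c * n for c, n in g)
-- ===== Notes on version B (the rewrite author's own statement) =====
-- stated objective: alternative
-- what changed: A's one-pass stack of (char,count) with deferred pops is replaced by a fixpoint loop that decomposes the current string into maximal runs, deletes the leftmost run of length >= k, rebuilds the string and rescans until no such run remains.
import Mathlib
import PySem

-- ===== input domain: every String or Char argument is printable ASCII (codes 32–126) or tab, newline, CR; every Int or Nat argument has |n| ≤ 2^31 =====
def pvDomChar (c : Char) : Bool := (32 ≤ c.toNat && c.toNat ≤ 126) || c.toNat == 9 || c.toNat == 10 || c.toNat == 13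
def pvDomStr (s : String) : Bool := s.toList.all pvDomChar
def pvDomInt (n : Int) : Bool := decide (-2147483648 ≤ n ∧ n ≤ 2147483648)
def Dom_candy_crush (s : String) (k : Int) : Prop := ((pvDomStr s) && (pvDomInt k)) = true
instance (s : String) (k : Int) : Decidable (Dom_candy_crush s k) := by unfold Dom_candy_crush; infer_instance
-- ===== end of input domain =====

-- B replaces A's one-pass stack by a rescan fixpoint: repeatedly delete the leftmost
-- maximal run of length ≥ k and rescan; an alternative decomposition, not faster.

-- ===== PORT A =====
-- one loop iteration of A: the body of 'for i in range(len(s))' acting on the stack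
-- (stack kept head-as-top, i.e. reversed w.r.t. the Python list)
def pvStepA (k : Int) (st : List (Char × Int)) (c : Char) : List (Char × Int) :=
  match st with
  | (d, n) :: rest =>
    if d == c then (d, n + 1) :: rest
    else
      let st1 := if n ≥ k then rest else st
      match st1 with
      | (e, m) :: r2 => if e == c then (e, m + 1) :: r2 else (c, 1) :: st1
      | [] => [(c, 1)]
  | [] => [(c, 1)]

-- the final 'if stack and stack[-1][1] >= k: stack.pop()'
def pvFinA (k : Int) (st : List (Char × Int)) : List (Char × Int) :=
  match st with
  | (d, n) :: rest => if n ≥ k then rest else st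
  | [] => []

-- ''.join(char*freq for char, freq in groups)
def pvRender (g : List (Char × Int)) : List Char :=
  g.flatMap (fun p => List.replicate p.2.toNat p.1)

def candy_crush (s : String) (k : Int) : String :=
  String.mk (pvRender (pvFinA k (s.toList.foldl (pvStepA k) [])).reverse)

-- ===== PORT B =====
-- _runs: maximal-run decomposition (Source B builds it right-to-left; structural recursion here)
def pvRuns : List Char → List (Char × Int)
  | [] => []
  | c :: cs =>
    match pvRuns cs with
    | (d, n) :: t => if c == d then (c, n + 1) :: t else (c, 1) :: (d, n) :: t
    | [] => [(c, 1)]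

-- _remove_first: drop the leftmost run of length ≥ k, none if there is no such run
def pvRemoveFirst (k : Int) : List (Char × Int) → Option (List (Char × Int))
  | [] => none
  | (c, n) :: t => if n ≥ k then some t else (pvRemoveFirst k t).map (fun r => (c, n) :: r)

-- termination facts for the while-loop of Source B (cited by pvCrushLoop's decreasing_by)
theorem pvRuns_pos (cs : List Char) : ∀ p ∈ pvRuns cs, 1 ≤ p.2 := by
  induction cs with
  | nil => simp [pvRuns]
  | cons c cs ih =>
    intro p hp
    rcases h : pvRuns cs with _ | ⟨⟨d, n⟩, t⟩
    · have heq : pvRuns (c :: cs) = [(c, 1)] := by simp [pvRuns, h]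
      rw [heq] at hp; simp at hp; simp [hp]
    · have hn : 1 ≤ n := by simpa using ih (d, n) (by rw [h]; simp)
      by_cases hc : c == d
      · have heq : pvRuns (c :: cs) = (c, n + 1) :: t := by simp [pvRuns, h, hc]
        rw [heq] at hp
        rcases List.mem_cons.mp hp with rfl | hp
        · simp; omega
        · exact ih p (by rw [h]; exact List.mem_cons_of_mem _ hp)
      · have heq : pvRuns (c :: cs) = (c, 1) :: (d, n) :: t := by simp [pvRuns, h, hc]
        rw [heq] at hp
        rcases List.mem_cons.mp hp with rfl | hp
        · simp
        · exact ih p (by rw [h]; exact hp)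

theorem pvRuns_render (cs : List Char) : pvRender (pvRuns cs) = cs := by
  induction cs with
  | nil => simp [pvRuns, pvRender]
  | cons c cs ih =>
    simp only [pvRuns]
    rcases h : pvRuns cs with _ | ⟨⟨d, n⟩, t⟩
    · rw [h] at ih; simpa [pvRender] using ih
    · rw [h] at ih
      by_cases hc : c == d
      · have hd : c = d := by simpa using hc
        have hn : 1 ≤ n := by
          have := pvRuns_pos cs (d, n) (by rw [h]; simp); simpa using this
        simp only [hc, if_pos]
        simp only [pvRender, List.flatMap_cons] at ih ⊢
        have : (n + 1).toNat = n.toNat + 1 := by omega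
        rw [this, ← ih, hd]
        simp [List.replicate_succ]
      · simp only [hc, if_neg, Bool.false_eq_true, not_false_iff]
        simp only [pvRender, List.flatMap_cons] at ih ⊢
        rw [← ih]
        simp [List.replicate]

theorem pvRemoveFirst_dec (k : Int) (G g : List (Char × Int))
    (hpos : ∀ p ∈ G, 1 ≤ p.2) (h : pvRemoveFirst k G = some g) :
    (pvRender g).length < (pvRender G).length := by
  induction G generalizing g with
  | nil => simp [pvRemoveFirst] at h
  | cons p t ih =>
    obtain ⟨c, n⟩ := p
    have h1 : 1 ≤ n := by simpa using hpos (c, n) (List.mem_cons_self)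
    simp only [pvRemoveFirst] at h
    by_cases hk : n ≥ k
    · rw [if_pos hk] at h
      cases h
      simp only [pvRender, List.flatMap_cons, List.length_append, List.length_replicate]
      omega
    · rw [if_neg hk, Option.map_eq_some_iff] at h
      obtain ⟨r, hr, rfl⟩ := h
      have := ih r (fun q hq => hpos q (List.mem_cons_of_mem _ hq)) hr
      simp only [pvRender, List.flatMap_cons, List.length_append, List.length_replicate] at this ⊢
      omega

-- the while-loop of Source B
def pvCrushLoop (k : Int) (cs : List Char) : List Char :=
  match h : pvRemoveFirst k (pvRuns cs) with
  | none => cs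
  | some g => pvCrushLoop k (pvRender g)
termination_by cs.length
decreasing_by
  have := pvRemoveFirst_dec k (pvRuns cs) g (pvRuns_pos cs) h
  rw [pvRuns_render] at this
  exact this

def candy_crush_alt (s : String) (k : Int) : String :=
  String.mk (pvCrushLoop k s.toList)

-- ===== PRECONDITION & SPEC =====
def Spec_candy_crush (s : String) (k : Int) (out : String) : Prop := out = candy_crush_alt s k
instance (s : String) (k : Int) (out : String) : Decidable (Spec_candy_crush s k out) := by unfold Spec_candy_crush; infer_instance

-- ===== CLAIM (what is proved, stated in full; the proofs are below) =====
def Claim_equal_candy_crush : Prop := ∀ (s : String) (k : Int), Dom_candy_crush s k → Spec_candy_crush s k (candy_crush s k)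

-- ===== LEMMAS AND PROOFS =====

-- top-of-stack condition: the (possible) top entry has a different char and a count < k
def pvTopOK (c : Char) (k : Int) (S : List (Char × Int)) : Prop :=
  ∀ p ∈ S.head?, p.1 ≠ c ∧ p.2 < k

theorem pvRuns_chain (cs : List Char) :
    List.IsChain (fun p q : Char × Int => p.1 ≠ q.1) (pvRuns cs) := by
  induction cs with
  | nil => exact List.isChain_nil
  | cons c cs ih =>
    rcases h : pvRuns cs with _ | ⟨⟨d, n⟩, t⟩
    · have heq : pvRuns (c :: cs) = [(c, 1)] := by simp [pvRuns, h]
      rw [heq]; exact List.isChain_singleton _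
    · rw [h] at ih
      by_cases hc : c == d
      · have hd : c = d := by simpa using hc
        have heq : pvRuns (c :: cs) = (c, n + 1) :: t := by simp [pvRuns, h, hc]
        rw [heq]
        rcases List.isChain_cons.mp ih with ⟨hrel, htail⟩
        exact List.isChain_cons.mpr ⟨fun y hy => by
          have := hrel y hy; simpa [hd] using this, htail⟩
      · have hd : c ≠ d := by simpa using hc
        have heq : pvRuns (c :: cs) = (c, 1) :: (d, n) :: t := by simp [pvRuns, h, hc]
        rw [heq]
        exact List.isChain_cons.mpr ⟨fun y hy => by
          simp at hy; rw [← hy]; exact hd, ih⟩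

theorem pvRemoveFirst_none (k : Int) (G : List (Char × Int))
    (h : pvRemoveFirst k G = none) : ∀ p ∈ G, p.2 < k := by
  induction G with
  | nil => simp
  | cons p t ih =>
    obtain ⟨c, n⟩ := p
    simp only [pvRemoveFirst] at h
    by_cases hk : n ≥ k
    · simp [hk] at h
    · rw [if_neg hk, Option.map_eq_none_iff] at h
      intro q hq
      rcases List.mem_cons.mp hq with rfl | hq
      · simpa using by omega
      · exact ih h q hq

theorem pvRemoveFirst_split (k : Int) (G g : List (Char × Int))
    (h : pvRemoveFirst k G = some g) :
    ∃ P c m Q, G = P ++ (c, m) :: Q ∧ g = P ++ Q ∧ (∀ p ∈ P, p.2 < k) ∧ k ≤ m := by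
  induction G generalizing g with
  | nil => simp [pvRemoveFirst] at h
  | cons p t ih =>
    obtain ⟨c, n⟩ := p
    simp only [pvRemoveFirst] at h
    by_cases hk : n ≥ k
    · rw [if_pos hk] at h
      cases h
      exact ⟨[], c, n, t, by simp, by simp, by simp, hk⟩
    · rw [if_neg hk, Option.map_eq_some_iff] at h
      obtain ⟨r, hr, rfl⟩ := h
      obtain ⟨P, c', m, Q, h1, h2, h3, h4⟩ := ih r hr
      refine ⟨(c, n) :: P, c', m, Q, by simp [h1], by simp [h2], ?_, h4⟩
      intro q hq
      rcases List.mem_cons.mp hq with rfl | hq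
      · simpa using by omega
      · exact h3 q hq

-- folding a block of equal chars onto a same-char top only increments the count
theorem pvFoldA_replicate_top (k : Int) (c : Char) (j : Int) (S : List (Char × Int)) (m : Nat) :
    (List.replicate m c).foldl (pvStepA k) ((c, j) :: S) = (c, j + m) :: S := by
  induction m generalizing j with
  | zero => simp
  | succ m ih =>
    rw [List.replicate_succ, List.foldl_cons]
    have hstep : pvStepA k ((c, j) :: S) c = (c, j + 1) :: S := by
      simp [pvStepA]
    rw [hstep, ih]
    congr 1
    push_cast
    ring_nf

-- folding a fresh run c^m (m ≥ 1) onto a stack whose top is safe pushes one new entry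
theorem pvFoldA_replicate (k : Int) (c : Char) (S : List (Char × Int)) (m : Nat)
    (hm : 1 ≤ m) (hS : pvTopOK c k S) :
    (List.replicate m c).foldl (pvStepA k) S = (c, (m : Int)) :: S := by
  obtain ⟨m', rfl⟩ : ∃ m', m = m' + 1 := ⟨m - 1, by omega⟩
  rw [List.replicate_succ, List.foldl_cons]
  have hstep : pvStepA k S c = (c, 1) :: S := by
    rcases S with _ | ⟨⟨e, p⟩, r⟩
    · simp [pvStepA]
    · have he := hS (e, p) (by simp)
      simp only at he
      have h1 : (e == c) = false := by simpa using he.1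
      have h2 : ¬ (p ≥ k) := by omega
      simp [pvStepA, h1, h2]
  rw [hstep, pvFoldA_replicate_top]
  congr 1
  push_cast
  ring_nf

-- folding the rendering of a normal run list (adjacent-distinct, counts in [1, k)) just stacks it
theorem pvFoldA_normal (k : Int) (G : List (Char × Int)) (S : List (Char × Int))
    (hch : List.IsChain (fun p q : Char × Int => p.1 ≠ q.1) G)
    (hcnt : ∀ p ∈ G, 1 ≤ p.2 ∧ p.2 < k)
    (hS : ∀ p ∈ G.head?, pvTopOK p.1 k S) :
    (pvRender G).foldl (pvStepA k) S = G.reverse ++ S := by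
  induction G generalizing S with
  | nil => simp [pvRender]
  | cons p G' ih =>
    obtain ⟨c, m⟩ := p
    have hm := hcnt (c, m) List.mem_cons_self
    simp only at hm
    have h1 : (List.replicate m.toNat c).foldl (pvStepA k) S = (c, (m.toNat : Int)) :: S :=
      pvFoldA_replicate k c S m.toNat (by omega) (hS (c, m) (by simp))
    have hmc : ((m.toNat : Int)) = m := by omega
    have hr : pvRender ((c, m) :: G') = List.replicate m.toNat c ++ pvRender G' := by
      simp [pvRender]
    have h2 := ih hch.tail (fun q hq => hcnt q (List.mem_cons_of_mem _ hq))
      (S := (c, m) :: S) ?_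
    · rw [hr, List.foldl_append, h1, hmc, h2]
      simp
    · intro q hq r hrr
      simp at hrr
      subst hrr
      refine ⟨?_, by simpa using hm.2⟩
      have := hch.rel_head? hq
      intro hcq
      exact this (by simp [hcq.symm])

-- after the first char of vs, a popped-away top with count ≥ k leaves the same stack
theorem pvFoldA_skip (k : Int) (c : Char) (m : Int) (S : List (Char × Int)) (vs : List Char)
    (hm : k ≤ m)
    (hS : ∀ p ∈ S.head?, p.2 < k)
    (hv : ∀ d ∈ vs.head?, d ≠ c) :
    pvFinA k (vs.foldl (pvStepA k) ((c, m) :: S)) = pvFinA k (vs.foldl (pvStepA k) S) := by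
  rcases vs with _ | ⟨d, vs'⟩
  · simp only [List.foldl_nil, pvFinA]
    rcases S with _ | ⟨⟨e, p⟩, r⟩
    · simp [hm]
    · have hp := hS (e, p) (by simp)
      simp only at hp
      simp [hm, show ¬ (p ≥ k) by omega]
  · have hd : d ≠ c := hv d (by simp)
    simp only [List.foldl_cons]
    have heq : pvStepA k ((c, m) :: S) d = pvStepA k S d := by
      have hcd : (c == d) = false := by
        simpa using fun h => hd (by simp [h.symm])
      rcases S with _ | ⟨⟨e, p⟩, r⟩
      · simp [pvStepA, hcd, hm]
      · have hp := hS (e, p) (by simp)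
        simp only at hp
        by_cases he : e == d
        · simp [pvStepA, hcd, hm, he]
        · simp [pvStepA, hcd, hm, he, show ¬ (p ≥ k) by omega]
    rw [heq]

-- pvRender distributes over append
theorem pvRender_append (g h : List (Char × Int)) :
    pvRender (g ++ h) = pvRender g ++ pvRender h := by
  simp [pvRender]

-- head char of a rendered run list with positive counts
theorem pvRender_head (Q : List (Char × Int)) (hpos : ∀ p ∈ Q, 1 ≤ p.2) :
    ∀ d ∈ (pvRender Q).head?, ∃ p ∈ Q.head?, p.1 = d := by
  rcases Q with _ | ⟨⟨c, n⟩, t⟩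
  · simp [pvRender]
  · have h1 : 1 ≤ n := by simpa using hpos (c, n) List.mem_cons_self
    intro d hd
    simp only [pvRender, List.flatMap_cons] at hd
    have hnn : n.toNat = (n.toNat - 1) + 1 := by omega
    rw [hnn, List.replicate_succ] at hd
    simp at hd
    exact ⟨(c, n), by simp, by simp [hd]⟩

-- A's fold result: the core of candy_crush, as a list function
def pvACore (k : Int) (cs : List Char) : List Char :=
  pvRender (pvFinA k (cs.foldl (pvStepA k) [])).reverse

-- key lemma: deleting the leftmost run of length ≥ k does not change A's result
theorem pvACore_step (k : Int) (cs : List Char) (g : List (Char × Int))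
    (h : pvRemoveFirst k (pvRuns cs) = some g) :
    pvACore k cs = pvACore k (pvRender g) := by
  obtain ⟨P, c, m, Q, hG, hg, hPlt, hkm⟩ := pvRemoveFirst_split k (pvRuns cs) g h
  have hch := pvRuns_chain cs
  have hpos := pvRuns_pos cs
  rw [hG] at hch hpos
  have hchP : List.IsChain (fun p q : Char × Int => p.1 ≠ q.1) P :=
    (List.isChain_append.mp hch).1
  have hchCQ : List.IsChain (fun p q : Char × Int => p.1 ≠ q.1) ((c, m) :: Q) :=
    (List.isChain_append.mp hch).2.1
  have hjun := (List.isChain_append.mp hch).2.2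
  have hPcnt : ∀ p ∈ P, 1 ≤ p.2 ∧ p.2 < k := fun p hp =>
    ⟨hpos p (by simp [hp]), hPlt p hp⟩
  have hQpos : ∀ p ∈ Q, 1 ≤ p.2 := fun p hp => hpos p (by simp [hp])
  have hmpos : 1 ≤ m := by simpa using hpos (c, m) (by simp)
  -- the stack after folding (pvRender P): P.reverse
  have hfoldP : (pvRender P).foldl (pvStepA k) [] = P.reverse := by
    have := pvFoldA_normal k P [] hchP hPcnt (by intro p hp q hq; simp at hq)
    simpa using this
  -- top of P.reverse is safe for c
  have hTop : pvTopOK c k P.reverse := by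
    intro p hp
    rw [List.head?_reverse] at hp
    constructor
    · intro hpc
      exact (hjun p hp (c, m) (by simp)) (by simp [hpc])
    · exact hPlt p (List.mem_of_mem_getLast? hp)
  have hTopCnt : ∀ p ∈ P.reverse.head?, p.2 < k := fun p hp => (hTop p hp).2
  -- fold of the run c^m on top of P.reverse
  have hfoldC : (List.replicate m.toNat c).foldl (pvStepA k) P.reverse
      = (c, m) :: P.reverse := by
    rw [pvFoldA_replicate k c P.reverse m.toNat (by omega) hTop]
    congr 2
    omega
  -- head chars of pvRender Q differ from c
  have hvQ : ∀ d ∈ (pvRender Q).head?, d ≠ c := by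
    intro d hd hdc
    obtain ⟨p, hp, hpd⟩ := pvRender_head Q hQpos d hd
    exact (hchCQ.rel_head? hp) (by simp [hpd, hdc])
  -- assemble both sides
  have hcs : cs = pvRender P ++ (List.replicate m.toNat c ++ pvRender Q) := by
    have h0 := pvRuns_render cs
    rw [hG] at h0
    rw [← h0, pvRender_append]
    simp [pvRender, List.flatMap_cons]
  unfold pvACore
  rw [hcs, hg, pvRender_append]
  simp only [List.foldl_append]
  rw [hfoldP, hfoldC]
  rw [pvFoldA_skip k c m P.reverse (pvRender Q) hkm hTopCnt hvQ]

-- base case: no run has length ≥ k, A returns the input unchanged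
theorem pvACore_fix (k : Int) (cs : List Char)
    (h : pvRemoveFirst k (pvRuns cs) = none) :
    pvACore k cs = cs := by
  have hlt := pvRemoveFirst_none k (pvRuns cs) h
  have hpos := pvRuns_pos cs
  have hfold : cs.foldl (pvStepA k) [] = (pvRuns cs).reverse := by
    conv_lhs => rw [← pvRuns_render cs]
    have := pvFoldA_normal k (pvRuns cs) [] (pvRuns_chain cs)
      (fun p hp => ⟨hpos p hp, hlt p hp⟩) (by intro p hp q hq; simp at hq)
    simpa using this
  have hfin : pvFinA k ((pvRuns cs).reverse) = (pvRuns cs).reverse := by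
    rcases hr : (pvRuns cs).reverse with _ | ⟨⟨d, n⟩, t⟩
    · simp [pvFinA]
    · have hd : (d, n) ∈ pvRuns cs := by
        have : (d, n) ∈ (pvRuns cs).reverse := by rw [hr]; simp
        simpa using this
      have := hlt (d, n) hd
      simp only at this
      simp [pvFinA, show ¬ (n ≥ k) by omega]
  unfold pvACore
  rw [hfold, hfin]
  simp [pvRuns_render]

-- A's core equals B's while-loop, by induction along B's recursion
theorem pvACore_eq_loop (k : Int) (cs : List Char) :
    pvACore k cs = pvCrushLoop k cs := by
  induction cs using pvCrushLoop.induct k with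
  | case1 cs h =>
    rw [pvACore_fix k cs h, pvCrushLoop.eq_def]
    split <;> simp_all
  | case2 cs g h ih =>
    have hloop : pvCrushLoop k cs = pvCrushLoop k (pvRender g) := by
      conv_lhs => rw [pvCrushLoop.eq_def]
      split
      · simp_all
      · rename_i g' h'
        rw [h] at h'
        cases h'
        rfl
    rw [pvACore_step k cs g h, ih, hloop]

-- ===== VERDICT (by name: the statement is the Claim_ definition above) =====
theorem candy_crush_spec : Claim_equal_candy_crush := by
  intro s k _
  unfold Spec_candy_crush candy_crush candy_crush_alt
  rw [show pvRender (pvFinA k (s.toList.foldl (pvStepA k) [])).reverse = pvACore k s.toList from rfl,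
    pvACore_eq_loop]
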